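-- pv_equiv track=rewrite | github.com/MargaritaTkachuk/Algorithm | lab10/t10_05_e1266.py | solve
-- ===== SOURCE A (Python) =====
-- def solve(n, lst, res, i, current_max):
--     if current_max[0] == n:
--         return current_max[0]
--
--     if i == len(lst):
--         if res > current_max[0]:
--             current_max[0] = res
--         return res
--
--     if res + sum(lst[i:]) <= current_max[0]:
--         return current_max[0]
--
--     if res + lst[i] <= n:
--         solve(n, lst, res + lst[i], i + 1, current_max)
--
--     solve(n, lst, res, i + 1, current_max)
--
--     return current_max[0]
-- ===== SOURCE B (Python) =====
-- def solve(n, lst, res, i, current_max):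
--     best = current_max[0]
--     stack = [(res, i)]
--     while stack:
--         r, j = stack.pop()
--         if best == n:
--             break
--         if j == len(lst):
--             best = max(best, r)
--             continue
--         if r + sum(lst[j:]) <= best:
--             continue
--         stack.append((r, j + 1))
--         if r + lst[j] <= n:
--             stack.append((r + lst[j], j + 1))
--     current_max[0] = best
--     return best
-- ===== Notes on version B (the rewrite author's own statement) =====
-- stated objective: alternative
-- what changed: Replaces A's recursive backtracking, which threads the running maximum through a mutated one-element list and returns inconsistent values at its base cases, by an iterative explicit-stack DFS that keeps the running maximum in a plain accumulator and always returns it; Pre_ excludes only inputs where A raises IndexError (empty current_max, or an index i that reaches lst[i] out of range).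
-- intended difference: When i == len(lst), current_max[0] != n and res < current_max[0], A returns the stale res instead of the recorded maximum while B returns current_max[0]; B's value is intended since every other branch of A returns the running maximum and current_max[0] is the best value found. — e.g. on solve(5, [1], 3, 1, [4]): A returns 3, B returns 4
import Mathlib
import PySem

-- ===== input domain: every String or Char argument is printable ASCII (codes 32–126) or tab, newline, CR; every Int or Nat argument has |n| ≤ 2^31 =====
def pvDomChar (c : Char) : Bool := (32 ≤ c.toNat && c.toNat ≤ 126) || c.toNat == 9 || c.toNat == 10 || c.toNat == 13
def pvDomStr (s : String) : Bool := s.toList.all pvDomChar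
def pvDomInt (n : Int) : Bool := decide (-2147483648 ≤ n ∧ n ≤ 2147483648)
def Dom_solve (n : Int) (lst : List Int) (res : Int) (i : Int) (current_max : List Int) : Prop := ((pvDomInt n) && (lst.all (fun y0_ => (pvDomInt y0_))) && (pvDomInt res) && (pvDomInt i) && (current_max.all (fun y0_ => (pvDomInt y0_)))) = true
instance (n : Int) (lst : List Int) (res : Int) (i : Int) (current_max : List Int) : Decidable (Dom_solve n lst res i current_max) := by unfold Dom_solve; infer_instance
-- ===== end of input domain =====

-- B replaces A's recursive backtracking (which threads the maximum through a mutated one-cell list)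
-- by an iterative explicit-stack DFS with the running maximum as a plain accumulator, always
-- returning that maximum; both programs leave the same value in current_max[0]; the theorems are
-- about the return value. Objective: alternative decomposition (same cost).

-- ===== PORT A =====
-- sum(lst[i:]) (Python slice semantics: negative start counts from the end, out-of-range clamps)
def sumFrom (lst : List Int) (i : Int) : Int :=
  (PySem.List.slice lst (some i) none).sum

-- A's recursion, fuel = number of remaining index increments (under Pre_ it is exact: len(lst) - i).
-- State: c = current_max[0]; returns (return value, final c). lst[i] is read with pyGet?;
-- the .getD 0 / fuel-0 defaults are never reached on inputs satisfying Pre_solve (there Python raises).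
def runA (n : Int) (lst : List Int) : Nat → Int → Int → Int → Int × Int
  | 0, res, i, c =>
    if c = n then (c, c)
    else if i = (lst.length : Int) then (res, if res > c then res else c)
    else if res + sumFrom lst i ≤ c then (c, c)
    else (0, c)  -- unreachable under Pre_solve (Python raises IndexError beyond this point)
  | fuel + 1, res, i, c =>
    if c = n then (c, c)
    else if i = (lst.length : Int) then (res, if res > c then res else c)
    else if res + sumFrom lst i ≤ c then (c, c)
    else
      let x := (PySem.List.pyGet? lst i).getD 0
      let c1 := if res + x ≤ n then (runA n lst fuel (res + x) (i + 1) c).2 else c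
      let c2 := (runA n lst fuel res (i + 1) c1).2
      (c2, c2)

def solve (n : Int) (lst : List Int) (res : Int) (i : Int) (current_max : List Int) : Int :=
  (runA n lst ((lst.length - i).toNat) res i (current_max.headD 0)).1

-- ===== PORT B =====
-- the while loop of Source B: stack of pending (r, j) frames, head = top of stack; best is the running
-- maximum. The Nat argument is fuel for the loop: solve_alt passes 3^(len-i), an upper bound on the
-- number of iterations (lemma runB_le_fuel below); the fuel-0 default is never reached from solve_alt.
def runB (n : Int) (lst : List Int) : Nat → List (Int × Int) → Int → Int
  | 0, _, best => best
  | _ + 1, [], best => best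
  | fuel + 1, (r, j) :: rest, best =>
    if best = n then best
    else if j = (lst.length : Int) then runB n lst fuel rest (if r > best then r else best)
    else if r + sumFrom lst j ≤ best then runB n lst fuel rest best
    else if (lst.length : Int) < j ∨ j < -(lst.length : Int) then best  -- lst[j]: IndexError in Python, outside Pre_solve
    else if r + (PySem.List.pyGet? lst j).getD 0 ≤ n then
      runB n lst fuel ((r + (PySem.List.pyGet? lst j).getD 0, j + 1) :: (r, j + 1) :: rest) best
    else runB n lst fuel ((r, j + 1) :: rest) best

def solve_alt (n : Int) (lst : List Int) (res : Int) (i : Int) (current_max : List Int) : Int :=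
  runB n lst (3 ^ (((lst.length : Int) - i).toNat)) [(res, i)] (current_max.headD 0)

-- ===== PRECONDITION & SPEC =====
-- Pre_solve is exactly the set of inputs on which Python A returns normally: current_max nonempty
-- (else current_max[0] raises IndexError) and either i a valid recursion index (-len ≤ i ≤ len,
-- Python's negative indices wrap), or i out of range but caught by an early return (current_max[0] == n,
-- or the sum-prune, whose slice is empty for i > len and the whole list for i < -len) before lst[i] raises.
def Pre_solve (n : Int) (lst : List Int) (res : Int) (i : Int) (current_max : List Int) : Prop :=
  current_max ≠ [] ∧
  ((-(lst.length : Int) ≤ i ∧ i ≤ (lst.length : Int))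
    ∨ ((lst.length : Int) < i ∧ (res ≤ current_max.headD 0 ∨ current_max.headD 0 = n))
    ∨ (i < -(lst.length : Int) ∧ (res + lst.sum ≤ current_max.headD 0 ∨ current_max.headD 0 = n)))
instance (n : Int) (lst : List Int) (res : Int) (i : Int) (current_max : List Int) : Decidable (Pre_solve n lst res i current_max) := by unfold Pre_solve; infer_instance

def pvWitness_solve : Int × List Int × Int × Int × List Int := (5, [1, 2, 3], 0, 0, [0])

-- When i == len(lst), current_max[0] ≠ n and res < current_max[0], A returns the stale res instead
-- of the recorded maximum, while B returns current_max[0]; B's value is intended, since every other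
-- branch of A returns the running maximum and current_max[0] is the best value found.
def D_solve (n : Int) (lst : List Int) (res : Int) (i : Int) (current_max : List Int) : Prop :=
  current_max ≠ [] ∧ i = (lst.length : Int) ∧ current_max.headD 0 ≠ n ∧ res < current_max.headD 0
instance (n : Int) (lst : List Int) (res : Int) (i : Int) (current_max : List Int) : Decidable (D_solve n lst res i current_max) := by unfold D_solve; infer_instance

def Spec_solve (n : Int) (lst : List Int) (res : Int) (i : Int) (current_max : List Int) (out : Int) : Prop := ¬ D_solve n lst res i current_max → out = solve_alt n lst res i current_max
instance (n : Int) (lst : List Int) (res : Int) (i : Int) (current_max : List Int) (out : Int) : Decidable (Spec_solve n lst res i current_max out) := by unfold Spec_solve; infer_instance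

def pvDiffWitness_solve : Int × List Int × Int × Int × List Int := (5, [1], 3, 1, [4])
def pvDiffWitnessOut_solve : Int × Int := (3, 4)

-- ===== CLAIM (what is proved, stated in full; the proofs are below) =====
def Claim_unchanged_solve : Prop := ∀ (n : Int) (lst : List Int) (res : Int) (i : Int) (current_max : List Int), Dom_solve n lst res i current_max → Pre_solve n lst res i current_max → Spec_solve n lst res i current_max (solve n lst res i current_max)
def Claim_changed_solve : Prop := Dom_solve (pvDiffWitness_solve.1) (pvDiffWitness_solve.2.1) (pvDiffWitness_solve.2.2.1) (pvDiffWitness_solve.2.2.2.1) (pvDiffWitness_solve.2.2.2.2) ∧ Pre_solve (pvDiffWitness_solve.1) (pvDiffWitness_solve.2.1) (pvDiffWitness_solve.2.2.1) (pvDiffWitness_solve.2.2.2.1) (pvDiffWitness_solve.2.2.2.2) ∧ D_solve (pvDiffWitness_solve.1) (pvDiffWitness_solve.2.1) (pvDiffWitness_solve.2.2.1) (pvDiffWitness_solve.2.2.2.1) (pvDiffWitness_solve.2.2.2.2) ∧ solve (pvDiffWitness_solve.1) (pvDiffWitness_solve.2.1) (pvDiffWitness_solve.2.2.1) (pvDiffWitness_solve.2.2.2.1)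 (pvDiffWitness_solve.2.2.2.2) = pvDiffWitnessOut_solve.1 ∧ solve_alt (pvDiffWitness_solve.1) (pvDiffWitness_solve.2.1) (pvDiffWitness_solve.2.2.1) (pvDiffWitness_solve.2.2.2.1) (pvDiffWitness_solve.2.2.2.2) = pvDiffWitnessOut_solve.2 ∧ pvDiffWitnessOut_solve.1 ≠ pvDiffWitnessOut_solve.2
def Claim_exact_solve : Prop := ∀ (n : Int) (lst : List Int) (res : Int) (i : Int) (current_max : List Int), Dom_solve n lst res i current_max → Pre_solve n lst res i current_max → D_solve n lst res i current_max → solve n lst res i current_max ≠ solve_alt n lst res i current_max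

-- ===== LEMMAS AND PROOFS =====

-- the loop measure: an upper bound (strictly decreasing per iteration) on the remaining iterations
def muB (lst : List Int) (st : List (Int × Int)) : Nat :=
  (st.map (fun p => 3 ^ (((lst.length : Int) - p.2).toNat))).sum

theorem muB_cons (lst : List Int) (r j : Int) (rest : List (Int × Int)) :
    muB lst ((r, j) :: rest) = 3 ^ (((lst.length : Int) - j).toNat) + muB lst rest := by
  simp [muB]

theorem pow3_pos (k : Nat) : 0 < 3 ^ k := Nat.pow_pos (by norm_num)

theorem pow3_push {lst : List Int} {j : Int} (_h1 : -(lst.length : Int) ≤ j)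
    (h2 : j < (lst.length : Int)) :
    3 ^ (((lst.length : Int) - (j + 1)).toNat) + 3 ^ (((lst.length : Int) - (j + 1)).toNat)
      < 3 ^ (((lst.length : Int) - j).toNat) := by
  have hk : ((lst.length : Int) - j).toNat = ((lst.length : Int) - (j + 1)).toNat + 1 := by omega
  have hp := pow3_pos (((lst.length : Int) - (j + 1)).toNat)
  rw [hk, pow_succ]
  omega

-- runB is absorbing at best = n (the 'break' of Source B's loop)
theorem runB_n_eq (n : Int) (lst : List Int) (f : Nat) (st : List (Int × Int)) :
    runB n lst f st n = n := by
  match f, st with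
  | 0, _ => simp [runB]
  | _ + 1, [] => simp [runB]
  | _ + 1, (r, j) :: rest => simp [runB]

-- any fuel at least the measure gives the same result as one unit more
theorem runB_succ (n : Int) (lst : List Int) :
    ∀ (f : Nat) (st : List (Int × Int)) (c : Int), muB lst st ≤ f →
      runB n lst f st c = runB n lst (f + 1) st c := by
  intro f
  induction f with
  | zero =>
    intro st c h
    cases st with
    | nil => simp [runB]
    | cons p rest =>
      exfalso
      obtain ⟨r, j⟩ := p
      have := pow3_pos (((lst.length : Int) - j).toNat)
      rw [muB_cons] at h
      omega
  | succ f ih =>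
    intro st c h
    cases st with
    | nil => simp [runB]
    | cons p rest =>
      obtain ⟨r, j⟩ := p
      rw [muB_cons] at h
      have hw := pow3_pos (((lst.length : Int) - j).toNat)
      rw [runB, runB]
      by_cases hc : c = n
      · simp [hc]
      · by_cases hj : j = (lst.length : Int)
        · simp only [if_neg hc, if_pos hj]
          exact ih rest _ (by omega)
        · by_cases hp : r + sumFrom lst j ≤ c
          · simp only [if_neg hc, if_neg hj, if_pos hp]
            exact ih rest _ (by omega)
          · by_cases hg : (lst.length : Int) < j ∨ j < -(lst.length : Int)
            · simp [hc, hj, hp, hg]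
            · have hlt := pow3_push (by omega) (by omega : j < (lst.length : Int))
              by_cases hx : r + (PySem.List.pyGet? lst j).getD 0 ≤ n
              · simp only [if_neg hc, if_neg hj, if_neg hp, if_neg hg, if_pos hx]
                exact ih _ _ (by rw [muB_cons, muB_cons]; omega)
              · simp only [if_neg hc, if_neg hj, if_neg hp, if_neg hg, if_neg hx]
                exact ih _ _ (by rw [muB_cons]; omega)

-- hence runB is independent of the fuel once the fuel reaches the measure
theorem runB_le_fuel (n : Int) (lst : List Int) (f g : Nat) (st : List (Int × Int)) (c : Int)
    (hf : muB lst st ≤ f) (hfg : f ≤ g) : runB n lst f st c = runB n lst g st c := by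
  induction g, hfg using Nat.le_induction with
  | base => rfl
  | succ g hg ih => rw [ih, runB_succ n lst g st c (le_trans hf hg)]

-- processing the top stack frame (r, j) is exactly one call of A's recursion on the threaded maximum
theorem runB_runA (n : Int) (lst : List Int) :
    ∀ (fuel : Nat) (r j c : Int) (rest : List (Int × Int)) (f : Nat),
      -(lst.length : Int) ≤ j → j ≤ (lst.length : Int) →
      fuel = ((lst.length : Int) - j).toNat → muB lst ((r, j) :: rest) ≤ f →
      runB n lst f ((r, j) :: rest) c = runB n lst f rest ((runA n lst fuel r j c).2) := by
  intro fuel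
  induction fuel with
  | zero =>
    intro r j c rest f _ h2 h3 hf
    have hj : j = (lst.length : Int) := by omega
    have hw := pow3_pos (((lst.length : Int) - j).toNat)
    rw [muB_cons] at hf
    obtain ⟨f', rfl⟩ : ∃ f', f = f' + 1 := ⟨f - 1, by omega⟩
    by_cases hc : c = n
    · subst hc; simp [runB, runA, runB_n_eq]
    · rw [runB]
      simp only [runA, if_neg hc, hj]
      exact runB_le_fuel n lst f' (f' + 1) rest _ (by omega) (by omega)
  | succ fuel ih =>
    intro r j c rest f h1 h2 h3 hf
    have hw := pow3_pos (((lst.length : Int) - j).toNat)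
    rw [muB_cons] at hf
    obtain ⟨f', rfl⟩ : ∃ f', f = f' + 1 := ⟨f - 1, by omega⟩
    by_cases hc : c = n
    · subst hc; simp [runB, runA, runB_n_eq]
    · have hj : j ≠ (lst.length : Int) := by omega
      have hjlt : j < (lst.length : Int) := by omega
      by_cases hp : r + sumFrom lst j ≤ c
      · rw [runB]
        simp only [if_neg hc, if_neg hj, if_pos hp]
        rw [runA]
        simp only [if_neg hc, if_neg hj, if_pos hp]
        exact runB_le_fuel n lst f' (f' + 1) rest _ (by omega) (by omega)
      · have hg : ¬((lst.length : Int) < j ∨ j < -(lst.length : Int)) := by omega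
        have hlt := pow3_push h1 hjlt
        rw [runB]
        simp only [if_neg hc, if_neg hj, if_neg hp, if_neg hg]
        by_cases hx : r + (PySem.List.pyGet? lst j).getD 0 ≤ n
        · rw [if_pos hx,
            ih _ _ _ _ _ (by omega) (by omega) (by omega)
              (by simp only [muB_cons] at *; omega),
            ih _ _ _ _ _ (by omega) (by omega) (by omega)
              (by simp only [muB_cons] at *; omega),
            runB_le_fuel n lst f' (f' + 1) rest _ (by omega) (by omega)]
          congr 1
          simp [runA, hc, hj, hp, hx]
        · rw [if_neg hx,
            ih _ _ _ _ _ (by omega) (by omega) (by omega)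
              (by simp only [muB_cons] at *; omega),
            runB_le_fuel n lst f' (f' + 1) rest _ (by omega) (by omega)]
          congr 1
          simp [runA, hc, hj, hp, hx]

-- Python slice semantics of sum(lst[i:]) for out-of-range i
theorem slice_big {lst : List Int} {i : Int} (h : (lst.length : Int) < i) :
    PySem.List.slice lst (some i) none = [] := by
  have ha : PySem.List.clampIdx lst.length i = lst.length := by
    unfold PySem.List.clampIdx; split_ifs <;> omega
  simp [PySem.List.slice, ha]

theorem slice_small {lst : List Int} {i : Int} (h : i < -(lst.length : Int)) :
    PySem.List.slice lst (some i) none = lst := by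
  have ha : PySem.List.clampIdx lst.length i = 0 := by
    unfold PySem.List.clampIdx; split_ifs <;> omega
  simp [PySem.List.slice, ha]

-- ===== VERDICT (by name: the statement is the Claim_ definition above) =====
theorem solve_spec : Claim_unchanged_solve := by
  intro n lst res i cm _ hpre hnd
  obtain ⟨hne, hcase⟩ := hpre
  obtain ⟨c0, tl, rfl⟩ : ∃ c0 tl, cm = c0 :: tl := by
    cases cm with
    | nil => exact absurd rfl hne
    | cons a b => exact ⟨a, b, rfl⟩
  simp only [List.headD_cons] at hcase
  unfold solve solve_alt
  simp only [List.headD_cons]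
  obtain ⟨F', hF'⟩ : ∃ f', 3 ^ (((lst.length : Int) - i).toNat) = f' + 1 :=
    ⟨3 ^ (((lst.length : Int) - i).toNat) - 1,
      by have := pow3_pos (((lst.length : Int) - i).toNat); omega⟩
  by_cases hc : c0 = n
  · subst hc
    rw [hF', runB_n_eq]
    cases h : ((lst.length : Int) - i).toNat <;> simp [runA]
  · by_cases hi : i = (lst.length : Int)
    · -- ¬ D_ gives c0 ≤ res here
      have hres : ¬ res < c0 := by
        intro hlt
        exact hnd ⟨by simp, hi, by simp [hc], by simpa using hlt⟩
      have h0 : ((lst.length : Int) - i).toNat = 0 := by omega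
      rw [h0]
      rw [h0] at hF'
      rw [hF', runB]
      simp only [if_neg hc, if_pos hi, runA]
      have : (if res > c0 then res else c0) = res := by
        split_ifs with h
        · rfl
        · omega
      rw [this]
      cases F' with
      | zero => simp [runB]
      | succ m => simp [runB]
    · by_cases hp : res + sumFrom lst i ≤ c0
      · rw [hF', runB]
        simp only [if_neg hc, if_neg hi, if_pos hp]
        have hnil : ∀ f : Nat, runB n lst f [] c0 = c0 := by
          intro f; cases f <;> simp [runB]
        rw [hnil]
        cases h : ((lst.length : Int) - i).toNat <;> simp [runA, hc, hi, hp]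
      · have hrange : -(lst.length : Int) ≤ i ∧ i ≤ (lst.length : Int) := by
          rcases hcase with h | h | h
          · exact h
          · exfalso
            apply hp
            unfold sumFrom
            rw [slice_big h.1]
            rcases h.2 with h2 | h2
            · simpa using h2
            · exact absurd h2 hc
          · exfalso
            apply hp
            unfold sumFrom
            rw [slice_small h.1]
            rcases h.2 with h2 | h2
            · exact h2
            · exact absurd h2 hc
        obtain ⟨k, hk⟩ : ∃ k, ((lst.length : Int) - i).toNat = k + 1 :=
          ⟨((lst.length : Int) - i).toNat - 1, by omega⟩
        rw [hk]
        have hfst : (runA n lst (k + 1) res i c0).1 = (runA n lst (k + 1) res i c0).2 := by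
          simp [runA, hc, hi, hp]
        set F := 3 ^ (k + 1) with hF
        have hnil : runB n lst F [] ((runA n lst (k + 1) res i c0).2)
            = (runA n lst (k + 1) res i c0).2 := by
          cases hFe : F with
          | zero => simp [runB]
          | succ m => simp [runB]
        have hb := runB_runA n lst (k + 1) res i c0 [] F hrange.1 hrange.2 (by omega)
          (by simp [muB, hk, hF])
        rw [hnil] at hb
        rw [hb, ← hfst]

theorem solve_changed : Claim_changed_solve := by
  unfold Claim_changed_solve; decide

theorem solve_tight : Claim_exact_solve := by
  intro n lst res i cm _ _ hd
  obtain ⟨hne, hi, hc, hlt⟩ := hd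
  obtain ⟨c0, tl, rfl⟩ : ∃ c0 tl, cm = c0 :: tl := by
    cases cm with
    | nil => exact absurd rfl hne
    | cons a b => exact ⟨a, b, rfl⟩
  simp only [List.headD_cons] at hc hlt
  unfold solve solve_alt
  simp only [List.headD_cons]
  have h0 : ((lst.length : Int) - i).toNat = 0 := by omega
  rw [h0]
  have hA : (runA n lst 0 res i c0).1 = res := by simp [runA, hc, hi]
  have hmax : (if res > c0 then res else c0) = c0 := by
    have : ¬ res > c0 := by omega
    simp [this]
  have hB : runB n lst (3 ^ (0 : Nat)) [(res, i)] c0 = c0 := by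
    norm_num
    rw [runB]
    simp [hc, hi, hmax, runB]
  rw [hA, h0] at *
  norm_num at hB ⊢
  rw [hB]
  omega
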